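-- pv_equiv track=rewrite | github.com/Jobin-Nelson/learn | competitive_programming/october/check-if-two-string-arrays-are-equivalent.py | arrayStringsAreEqual
-- ===== SOURCE A (Python) =====
-- def arrayStringsAreEqual(word1: list[str], word2: list[str]) -> bool:
--     def gen(wordlist: list[str]):
--         for word in wordlist:
--             for char in word:
--                 yield char
--         yield None
--
--     for c1, c2 in zip(gen(word1), gen(word2)):
--         if c1 != c2: return False
--     return True
-- ===== SOURCE B (Python) =====
-- def arrayStringsAreEqual(word1: list[str], word2: list[str]) -> bool:
--     return ''.join(word1) == ''.join(word2)
-- ===== Notes on version B (the rewrite author's own statement) =====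
-- stated objective: idiomatic
-- what changed: Replaces the lazy generator/zip character stream with a None sentinel by eagerly joining each list into one string and comparing the two strings directly.
import Mathlib
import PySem

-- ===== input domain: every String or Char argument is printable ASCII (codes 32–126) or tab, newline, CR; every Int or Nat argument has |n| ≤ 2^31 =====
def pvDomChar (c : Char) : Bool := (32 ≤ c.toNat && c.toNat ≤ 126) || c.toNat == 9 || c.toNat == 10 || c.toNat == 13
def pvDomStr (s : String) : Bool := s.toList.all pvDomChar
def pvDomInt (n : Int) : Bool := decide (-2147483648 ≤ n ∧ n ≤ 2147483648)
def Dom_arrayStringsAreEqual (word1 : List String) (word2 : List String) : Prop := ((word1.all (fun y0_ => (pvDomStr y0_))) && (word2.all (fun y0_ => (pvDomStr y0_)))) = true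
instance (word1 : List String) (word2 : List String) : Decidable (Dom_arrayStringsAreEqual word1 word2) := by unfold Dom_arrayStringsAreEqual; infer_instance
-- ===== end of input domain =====

-- B replaces A's lazy zipped character generators (None sentinel) with joining each list into one string and comparing the strings; same cost, more idiomatic.


-- ===== PORT A =====
-- gen(wordlist): yields every char of every word, then a final None sentinel
def pvGenA (wordlist : List String) : List (Option Char) :=
  (wordlist.flatMap (fun word => word.toList.map some)) ++ [none]

-- the for-loop over zip with early return False
def pvLoopA : List (Option Char × Option Char) → Bool
  | [] => true
  | (c1, c2) :: rest => if c1 ≠ c2 then false else pvLoopA rest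

def arrayStringsAreEqual (word1 : List String) (word2 : List String) : Bool :=
  pvLoopA ((pvGenA word1).zip (pvGenA word2))

-- ===== PORT B =====
def arrayStringsAreEqual_alt (word1 : List String) (word2 : List String) : Bool :=
  PySem.Str.join "" word1 == PySem.Str.join "" word2

-- ===== PRECONDITION & SPEC =====
def Spec_arrayStringsAreEqual (word1 : List String) (word2 : List String) (out : Bool) : Prop := out = arrayStringsAreEqual_alt word1 word2
instance (word1 : List String) (word2 : List String) (out : Bool) : Decidable (Spec_arrayStringsAreEqual word1 word2 out) := by unfold Spec_arrayStringsAreEqual; infer_instance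

-- ===== CLAIM (what is proved, stated in full; the proofs are below) =====
def Claim_equal_arrayStringsAreEqual : Prop := ∀ (word1 : List String) (word2 : List String), Dom_arrayStringsAreEqual word1 word2 → Spec_arrayStringsAreEqual word1 word2 (arrayStringsAreEqual word1 word2)

-- ===== LEMMAS AND PROOFS =====

theorem pvJoinNilFlatten (ps : List (List Char)) : PySem.Chars.join [] ps = ps.flatten := by
  induction ps with
  | nil => simp [PySem.Chars.join_nil]
  | cons x ps ih =>
      cases ps with
      | nil => simp [PySem.Chars.join_singleton]
      | cons y rest => simp [PySem.Chars.join_cons_cons] at ih ⊢; simpa using ih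

-- A's streaming loop on the two sentinel-terminated char streams is exactly list equality.
theorem pvLoopA_eq (as bs : List Char) :
    pvLoopA ((as.map some ++ [none]).zip (bs.map some ++ [none])) = (as == bs) := by
  induction as generalizing bs with
  | nil =>
      cases bs with
      | nil => simp [pvLoopA]
      | cons b bs => simp [pvLoopA]
  | cons a as ih =>
      cases bs with
      | nil => simp [pvLoopA]
      | cons b bs =>
          by_cases h : a = b
          · simpa [pvLoopA, h] using ih bs
          · simp [pvLoopA, h]

theorem arrayStringsAreEqual_spec_aux (word1 word2 : List String) :
    arrayStringsAreEqual word1 word2 = arrayStringsAreEqual_alt word1 word2 := by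
  unfold arrayStringsAreEqual arrayStringsAreEqual_alt pvGenA
  have h := pvLoopA_eq (word1.flatMap String.toList) (word2.flatMap String.toList)
  simp only [List.map_flatMap] at h
  rw [h]
  have hj : ∀ ws : List String, (PySem.Str.join "" ws).toList = ws.flatMap String.toList := by
    intro ws
    simp [PySem.Str.toList_join, pvJoinNilFlatten, List.flatMap]
  rw [Bool.eq_iff_iff]
  simp only [beq_iff_eq]
  rw [← hj word1, ← hj word2]
  exact ⟨fun h => String.toList_inj.mp h, fun h => by rw [h]⟩

-- ===== VERDICT (by name: the statement is the Claim_ definition above) =====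
theorem arrayStringsAreEqual_spec : Claim_equal_arrayStringsAreEqual := by
  intro word1 word2 _
  exact (arrayStringsAreEqual_spec_aux word1 word2)
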